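-- pv_equiv track=rewrite | github.com/commaai/openpilot | opendbc_repo/opendbc/car/crc.py | _gen_crc8_table
-- ===== SOURCE A (Python) =====
-- def _gen_crc8_table(poly: int) -> list[int]:
--   table = []
--   for i in range(256):
--     crc = i
--     for _ in range(8):
--       if crc & 0x80:
--         crc = ((crc << 1) ^ poly) & 0xFF
--       else:
--         crc = (crc << 1) & 0xFF
--     table.append(crc)
--   return table
-- ===== SOURCE B (Python) =====
-- def _gen_crc8_table(poly: int) -> list[int]:
--   # The 8-step CRC map is linear over GF(2): crc8(a ^ b) = crc8(a) ^ crc8(b) and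
--   # crc8(0) = 0.  So compute only the entries for the eight single-bit indices,
--   # advancing a running crc one shift/xor step per doubling (crc8(2^k) is one
--   # step applied to crc8(2^(k-1))), and fill the rest by XOR combination.
--   table = [0] * 256
--   crc = 0x80  # = crc state of input 1 after 7 of its 8 steps
--   for k in range(8):
--     i = 1 << k
--     crc = ((crc << 1) ^ poly) & 0xFF if crc & 0x80 else (crc << 1) & 0xFF
--     for j in range(i):
--       table[i + j] = crc ^ table[j]
--   return table
-- ===== Notes on version B (the rewrite author's own statement) =====
-- stated objective: faster
-- what changed: A runs the full eight-step shift/xor CRC loop for every byte value; B exploits GF(2)-linearity of the byte-to-CRC map (crc of a xor b equals crc of a xor crc of b, crc of zero is zero): it computes only the single-bit-index entries, advancing one running crc by a single step per doubling, and fills every other entry with one XOR of two earlier entries.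
import Mathlib
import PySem

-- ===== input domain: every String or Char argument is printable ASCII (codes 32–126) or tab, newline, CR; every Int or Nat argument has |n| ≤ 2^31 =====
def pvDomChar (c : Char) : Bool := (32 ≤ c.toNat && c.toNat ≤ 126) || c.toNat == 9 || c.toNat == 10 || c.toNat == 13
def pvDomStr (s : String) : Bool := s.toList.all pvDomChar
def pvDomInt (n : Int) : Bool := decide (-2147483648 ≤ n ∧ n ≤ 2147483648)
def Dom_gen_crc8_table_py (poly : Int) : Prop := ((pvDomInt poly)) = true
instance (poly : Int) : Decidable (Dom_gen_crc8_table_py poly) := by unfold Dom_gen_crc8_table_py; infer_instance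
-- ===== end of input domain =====

-- B replaces A's per-byte eight-step shift/xor loop by computing the single-bit CRC
-- entries and filling the rest of the table by GF(2)-linearity (table[i^j] = table[i]^table[j]);
-- objective: faster by constant factor (one XOR per remaining entry); same exact table for every int poly.


-- ===== PORT A =====
-- literal port of A: for each i in range(256), run 8 shift/xor steps on crc := i.
def gen_crc8_table_py (poly : Int) : List Int :=
  (PySem.List.pyRange 0 256 1).foldl
    (fun table i =>
      let crc := (List.range 8).foldl
        (fun crc _ =>
          if PySem.Int.band crc 128 ≠ 0 then
            PySem.Int.band (PySem.Int.bxor (crc <<< (1 : Nat)) poly) 255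
          else
            PySem.Int.band (crc <<< (1 : Nat)) 255)
        i
      table ++ [crc]) []

-- ===== PORT B =====
-- literal port of B (Source B): table := [0]*256; for k in range(8): i := 1 << k, advance
-- the running crc (seeded 0x80) one step, and set table[i+j] := crc ^ table[j] for
-- j in range(i).  Python's table[j] read is ported as getD (index < 256 = length, exact).
def gen_crc8_table_py_alt (poly : Int) : List Int :=
  ((List.range 8).foldl
    (fun (st : List Int × Int) k =>
      let i : Nat := 1 <<< k
      let crc : Int :=
        if PySem.Int.band st.2 128 ≠ 0 then
          PySem.Int.band (PySem.Int.bxor (st.2 <<< (1 : Nat)) poly) 255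
        else
          PySem.Int.band (st.2 <<< (1 : Nat)) 255
      ((List.range i).foldl (fun t j => t.set (i + j) (PySem.Int.bxor crc (t.getD j 0))) st.1,
       crc))
    (List.replicate 256 0, 128)).1

-- ===== PRECONDITION & SPEC =====
def Spec_gen_crc8_table_py (poly : Int) (out : List Int) : Prop := out = gen_crc8_table_py_alt poly
instance (poly : Int) (out : List Int) : Decidable (Spec_gen_crc8_table_py poly out) := by unfold Spec_gen_crc8_table_py; infer_instance

-- ===== CLAIM (what is proved, stated in full; the proofs are below) =====
def Claim_equal_gen_crc8_table_py : Prop := ∀ (poly : Int), Dom_gen_crc8_table_py poly → Spec_gen_crc8_table_py poly (gen_crc8_table_py poly)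

-- ===== LEMMAS AND PROOFS =====

-- The common one-byte CRC step, on Int (exactly as both ports write it) and on Nat.
def stepA (poly crc : Int) : Int :=
  if PySem.Int.band crc 128 ≠ 0 then
    PySem.Int.band (PySem.Int.bxor (crc <<< (1 : Nat)) poly) 255
  else
    PySem.Int.band (crc <<< (1 : Nat)) 255

def natStep (q c : Nat) : Nat :=
  if c &&& 128 ≠ 0 then ((c <<< 1) ^^^ q) &&& 255 else (c <<< 1) &&& 255

def crc8 (q n : Nat) : Nat := (natStep q)^[8] n

-- the low byte of poly, as a Nat
def lowByte (p : Int) : Nat := (PySem.Int.band p 255).toNat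

-- Nat-level image of B's outer loop body, and B's table at the Nat level
def tabStepN (q : Nat) (st : List Nat × Nat) (k : Nat) : List Nat × Nat :=
  let i : Nat := 1 <<< k
  let crc := natStep q st.2
  ((List.range i).foldl (fun t j => t.set (i + j) (crc ^^^ t.getD j 0)) st.1, crc)

def tableB (q : Nat) : List Nat :=
  ((List.range 8).foldl (tabStepN q) (List.replicate 256 0, 128)).1

-- B's outer loop body at the Int level (exactly the port's lambda)
def stepBInt (poly : Int) (st : List Int × Int) (k : Nat) : List Int × Int :=
  let i : Nat := 1 <<< k
  let crc : Int :=
    if PySem.Int.band st.2 128 ≠ 0 then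
      PySem.Int.band (PySem.Int.bxor (st.2 <<< (1 : Nat)) poly) 255
    else
      PySem.Int.band (st.2 <<< (1 : Nat)) 255
  ((List.range i).foldl (fun t j => t.set (i + j) (PySem.Int.bxor crc (t.getD j 0))) st.1,
   crc)

-- small arithmetic facts ---------------------------------------------------

lemma cast_shiftLeft_one (n : Nat) : ((n : Int) <<< (1 : Nat)) = ((n <<< 1 : Nat) : Int) := by
  norm_num

set_option maxRecDepth 4000 in
lemma sub255_eq_xor : ∀ s < 256, 255 - s = 255 ^^^ s := by decide

set_option maxRecDepth 4000 in
lemma two_pow_xor_eq_add : ∀ k < 8, ∀ j < 2 ^ k, 2 ^ k ^^^ j = 2 ^ k + j := by decide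

lemma and128_cases (a : Nat) : a &&& 128 = 0 ∨ a &&& 128 = 128 := by
  have h := Nat.and_two_pow a 7
  norm_num at h
  rcases Bool.eq_false_or_eq_true (a.testBit 7) with hb | hb <;> simp [hb] at h <;> omega

lemma xor_cancel_mid (X Y Q : Nat) : (X ^^^ Q) ^^^ (Y ^^^ Q) = X ^^^ Y := by
  rw [Nat.xor_assoc, Nat.xor_comm Y Q, ← Nat.xor_assoc Q Q Y, Nat.xor_self, Nat.zero_xor]

-- the masked-xor identity behind the step bridge (valid for every Int poly) --

lemma lowByte_natCast (t : Nat) : lowByte (t : Int) = t &&& 255 := by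
  rw [lowByte, show (255:Int) = ((255:Nat):Int) by norm_num, PySem.Int.band_natCast]
  simp

lemma band_bxor_255 (p : Int) (m : Nat) :
    PySem.Int.band (PySem.Int.bxor (m : Int) p) 255 = (((m ^^^ lowByte p) &&& 255 : Nat) : Int) := by
  rcases (show 0 ≤ p ∨ p < 0 by omega) with hp | hp
  · obtain ⟨t, rfl⟩ : ∃ t : Nat, p = (t : Int) := ⟨p.toNat, (Int.toNat_of_nonneg hp).symm⟩
    rw [PySem.Int.bxor_natCast, show (255:Int) = ((255:Nat):Int) by norm_num,
      PySem.Int.band_natCast, lowByte_natCast]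
    congr 1
    rw [Nat.and_xor_distrib_right, Nat.and_xor_distrib_right, Nat.land_assoc, Nat.and_self]
  · have hm : (0:Int) ≤ (m:Int) := Int.natCast_nonneg m
    have hbx : PySem.Int.bxor (m : Int) p = -(((m ^^^ (-p - 1).toNat : Nat) : Int)) - 1 := by
      simp only [PySem.Int.bxor]
      rw [if_pos hm, if_neg (by omega)]
      simp
    rw [hbx]
    have hx0 : (0:Int) ≤ ((m ^^^ (-p - 1).toNat : Nat) : Int) := Int.natCast_nonneg _
    have hlow : lowByte p = 255 - (255 &&& (-p - 1).toNat) := by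
      rw [lowByte]
      simp only [PySem.Int.band]
      rw [if_neg (by omega), if_pos (by norm_num)]
      simp
    simp only [PySem.Int.band]
    rw [if_neg (by omega), if_pos (by norm_num)]
    have harg : -(-(((m ^^^ (-p - 1).toNat : Nat) : Int)) - 1) - 1 = ((m ^^^ (-p - 1).toNat : Nat) : Int) := by ring
    rw [harg]
    simp only [Int.toNat_natCast]
    rw [hlow]
    congr 1
    rw [show (255:Int).toNat = 255 from rfl]
    set u := (-p - 1).toNat with hu
    have e1 : 255 - (255 &&& (m ^^^ u)) = 255 ^^^ (255 &&& (m ^^^ u)) :=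
      sub255_eq_xor _ (lt_of_le_of_lt Nat.and_le_left (by norm_num))
    have e2 : 255 - (255 &&& u) = 255 ^^^ (255 &&& u) :=
      sub255_eq_xor _ (lt_of_le_of_lt Nat.and_le_left (by norm_num))
    rw [e1, e2, Nat.and_xor_distrib_left, Nat.and_xor_distrib_right, Nat.and_xor_distrib_right,
      Nat.land_assoc, Nat.land_comm u 255, ← Nat.land_assoc, Nat.and_self,
      Nat.land_comm m 255]
    rw [← Nat.xor_assoc, Nat.xor_comm 255 (255 &&& m), Nat.xor_assoc]

lemma stepA_cast (p : Int) (n : Nat) : stepA p (n : Int) = ((natStep (lowByte p) n : Nat) : Int) := by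
  unfold stepA natStep
  rw [show (128:Int) = ((128:Nat):Int) by norm_num, PySem.Int.band_natCast, cast_shiftLeft_one]
  simp only [ne_eq, Int.natCast_eq_zero]
  split_ifs with h
  · rw [show (255:Int) = ((255:Nat):Int) by norm_num, PySem.Int.band_natCast]
  · exact band_bxor_255 p (n <<< 1)

-- linearity of the step and of crc8 over GF(2) -----------------------------

lemma natStep_xor (q a b : Nat) : natStep q (a ^^^ b) = natStep q a ^^^ natStep q b := by
  have hd : (a ^^^ b) &&& 128 = (a &&& 128) ^^^ (b &&& 128) := Nat.and_xor_distrib_right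
  rcases and128_cases a with ha | ha <;> rcases and128_cases b with hb | hb <;>
    simp only [natStep, hd, ha, hb] <;> norm_num <;>
    simp only [Nat.shiftLeft_xor_distrib, Nat.and_xor_distrib_right]
  · rw [Nat.xor_assoc]
  · rw [Nat.xor_assoc, Nat.xor_assoc, Nat.xor_comm ((b <<< 1) &&& 255) (q &&& 255)]
  · rw [xor_cancel_mid]

lemma natStep_zero (q : Nat) : natStep q 0 = 0 := by
  norm_num [natStep]

lemma iterate_natStep_xor (q k a b : Nat) :
    (natStep q)^[k] (a ^^^ b) = (natStep q)^[k] a ^^^ (natStep q)^[k] b := by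
  induction k generalizing a b with
  | zero => simp
  | succ k ih => simp [Function.iterate_succ_apply, natStep_xor, ih]

lemma crc8_xor (q a b : Nat) : crc8 q (a ^^^ b) = crc8 q a ^^^ crc8 q b :=
  iterate_natStep_xor q 8 a b

lemma iterate_natStep_zero (q k : Nat) : (natStep q)^[k] 0 = 0 := by
  induction k with
  | zero => rfl
  | succ k ih => simp [Function.iterate_succ_apply, natStep_zero, ih]

lemma crc8_zero (q : Nat) : crc8 q 0 = 0 := iterate_natStep_zero q 8

-- powers of two under the step ---------------------------------------------

lemma natStep_two_pow (q : Nat) : ∀ k < 7, natStep q (2 ^ k) = 2 ^ (k + 1) := by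
  intro k hk
  interval_cases k <;> (unfold natStep; rw [if_neg (by decide)]) <;> decide

lemma iterate_one_two_pow (q : Nat) : ∀ k ≤ 7, (natStep q)^[k] 1 = 2 ^ k := by
  intro k hk
  induction k with
  | zero => simp
  | succ k ih =>
    rw [Function.iterate_succ_apply', ih (by omega), natStep_two_pow q k (by omega)]

lemma crc8_two_pow (q : Nat) (k : Nat) (hk : k ≤ 7) :
    crc8 q (2 ^ k) = (natStep q)^[k + 1] 128 := by
  rw [crc8, ← iterate_one_two_pow q k hk, ← Function.iterate_add_apply,
    show 8 + k = (k + 1) + 7 by omega, Function.iterate_add_apply,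
    iterate_one_two_pow q 7 le_rfl]
  norm_num

-- list plumbing ------------------------------------------------------------

lemma getD_map_cast (t : List Nat) (j : Nat) :
    (t.map (fun x : Nat => (x : Int))).getD j 0 = ((t.getD j 0 : Nat) : Int) := by
  induction t generalizing j with
  | nil => simp
  | cons a t ih =>
    cases j with
    | zero => rfl
    | succ j => rw [List.map_cons, List.getD_cons_succ, List.getD_cons_succ, ih]

lemma getD_set' (l : List Nat) (a n v d : Nat) (h : a < l.length) :
    (l.set a v).getD n d = if a = n then v else l.getD n d := by
  by_cases han : a = n
  · subst han
    rw [List.getD, List.getElem?_set_self h, if_pos rfl]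
    rfl
  · rw [List.getD, List.getElem?_set_ne han, if_neg han, List.getD]

lemma foldl_const_iterate {α : Type} (f : α → α) (x : α) (k : Nat) :
    (List.range k).foldl (fun c _ => f c) x = f^[k] x := by
  induction k generalizing x with
  | zero => simp
  | succ k ih =>
    rw [List.range_succ, List.foldl_append]
    simp [ih, Function.iterate_succ_apply']

-- the inner fill loop of B, characterised ----------------------------------

lemma inner_spec (crc i : Nat) : ∀ m, m ≤ i → ∀ t : List Nat, t.length = 256 → i + m ≤ 256 →
    ((List.range m).foldl (fun t j => t.set (i + j) (crc ^^^ t.getD j 0)) t).length = 256 ∧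
    ∀ n < 256, ((List.range m).foldl (fun t j => t.set (i + j) (crc ^^^ t.getD j 0)) t).getD n 0 =
      if i ≤ n ∧ n < i + m then crc ^^^ t.getD (n - i) 0 else t.getD n 0 := by
  intro m
  induction m with
  | zero =>
    intro _ t ht _
    refine ⟨by rw [List.range_zero, List.foldl_nil]; exact ht, ?_⟩
    intro n _
    rw [List.range_zero, List.foldl_nil, if_neg (by omega)]
  | succ m ih =>
    intro hm t ht hi
    obtain ⟨ihl, ihv⟩ := ih (by omega) t ht (by omega)
    rw [List.range_succ, List.foldl_append, List.foldl_cons, List.foldl_nil]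
    set r := (List.range m).foldl (fun t j => t.set (i + j) (crc ^^^ t.getD j 0)) t with hr
    have hrm : r.getD m 0 = t.getD m 0 := by rw [ihv m (by omega), if_neg (by omega)]
    refine ⟨by rw [List.length_set, ihl], ?_⟩
    intro n hn
    rw [getD_set' r (i + m) n _ 0 (by rw [ihl]; omega)]
    by_cases hn1 : i + m = n
    · rw [if_pos hn1, if_pos (by omega), hrm, show n - i = m by omega]
    · rw [if_neg hn1, ihv n hn]
      by_cases h2 : i ≤ n ∧ n < i + m
      · rw [if_pos h2, if_pos (by omega)]
      · rw [if_neg h2, if_neg (by omega)]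

-- B's table invariant ------------------------------------------------------

lemma tabB_inv (q : Nat) : ∀ k, k ≤ 8 →
    (((List.range k).foldl (tabStepN q) (List.replicate 256 0, 128)).2 = (natStep q)^[k] 128) ∧
    (((List.range k).foldl (tabStepN q) (List.replicate 256 0, 128)).1.length = 256) ∧
    (∀ n < 256, ((List.range k).foldl (tabStepN q) (List.replicate 256 0, 128)).1.getD n 0 =
      if n < 2 ^ k then crc8 q n else 0) := by
  intro k
  induction k with
  | zero =>
    intro _
    simp only [List.range_zero, List.foldl_nil]
    refine ⟨rfl, List.length_replicate, ?_⟩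
    intro n hn
    have h1 : (2:Nat) ^ 0 = 1 := pow_zero 2
    by_cases h0 : n < 2 ^ 0
    · rw [if_pos h0, show n = 0 by omega, crc8_zero]
      exact List.getD_replicate 0 (by omega)
    · rw [if_neg h0]
      exact List.getD_replicate 0 hn
  | succ k ih =>
    intro hk
    obtain ⟨hc, hl, hv⟩ := ih (by omega)
    have hk7 : k ≤ 7 := by omega
    rw [List.range_succ, List.foldl_append, List.foldl_cons, List.foldl_nil]
    set st := (List.range k).foldl (tabStepN q) (List.replicate 256 0, 128) with hst
    have hsucc : natStep q ((natStep q)^[k] 128) = (natStep q)^[k + 1] 128 :=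
      (Function.iterate_succ_apply' (natStep q) k 128).symm
    have hfst : (tabStepN q st k).1 =
        (List.range (1 <<< k)).foldl
          (fun t j => t.set ((1 <<< k) + j) (natStep q st.2 ^^^ t.getD j 0)) st.1 := rfl
    rw [Nat.one_shiftLeft] at hfst
    have hsnd : (tabStepN q st k).2 = natStep q st.2 := rfl
    have hcrc : natStep q st.2 = crc8 q (2 ^ k) := by
      rw [hc, hsucc, crc8_two_pow q k hk7]
    have h2k : 2 ^ k + 2 ^ k ≤ 256 := by
      have h := Nat.pow_le_pow_right (by norm_num : 1 ≤ 2) (show k + 1 ≤ 8 by omega)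
      rw [pow_succ] at h
      norm_num at h
      omega
    obtain ⟨isl, isv⟩ := inner_spec (natStep q st.2) (2 ^ k) (2 ^ k) le_rfl st.1 hl (by omega)
    refine ⟨by rw [hsnd, hc, hsucc], by rw [hfst]; exact isl, ?_⟩
    intro n hn
    rw [hfst, isv n hn]
    by_cases hcase : 2 ^ k ≤ n ∧ n < 2 ^ k + 2 ^ k
    · rw [if_pos hcase, if_pos (by rw [pow_succ]; omega), hv (n - 2 ^ k) (by omega),
        if_pos (by omega), hcrc, ← crc8_xor,
        two_pow_xor_eq_add k (by omega) (n - 2 ^ k) (by omega),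
        show 2 ^ k + (n - 2 ^ k) = n by omega]
    · rw [if_neg hcase, hv n hn]
      by_cases h2 : n < 2 ^ k
      · rw [if_pos h2, if_pos (by rw [pow_succ]; omega)]
      · rw [if_neg h2, if_neg (by rw [pow_succ]; omega)]

lemma tableB_eq (q : Nat) : tableB q = (List.range 256).map (crc8 q) := by
  obtain ⟨-, hl, hv⟩ := tabB_inv q 8 le_rfl
  have hlen : (tableB q).length = 256 := hl
  apply List.ext_getElem
  · rw [hlen]; simp
  · intro i h1 h2
    have hi : i < 256 := by rw [hlen] at h1; exact h1
    simp only [List.getElem_map, List.getElem_range]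
    rw [← List.getD_eq_getElem (tableB q) 0 h1,
      show tableB q = ((List.range 8).foldl (tabStepN q) (List.replicate 256 0, 128)).1 from rfl,
      hv i hi, if_pos (by norm_num [hi])]

-- bridges from the Int-level ports ----------------------------------------

lemma iterate_stepA_cast (p : Int) (k n : Nat) :
    (stepA p)^[k] (n : Int) = (((natStep (lowByte p))^[k] n : Nat) : Int) := by
  induction k generalizing n with
  | zero => rfl
  | succ k ih => rw [Function.iterate_succ_apply, stepA_cast, ih, Function.iterate_succ_apply]

lemma pyRange256 : PySem.List.pyRange 0 256 1 = (List.range 256).map Int.ofNat := by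
  have h := PySem.List.pyRange_zero_natCast 256
  norm_num at h
  rw [h]
  rfl

lemma portA_eq (p : Int) :
    gen_crc8_table_py p = (List.range 256).map (fun n => ((crc8 (lowByte p) n : Nat) : Int)) := by
  have h0 : gen_crc8_table_py p =
      (PySem.List.pyRange 0 256 1).foldl
        (fun table i => table ++ [(List.range 8).foldl (fun crc _ => stepA p crc) i]) [] := rfl
  rw [h0, pyRange256, PySem.List.foldl_append_singleton_eq_map, List.nil_append, List.map_map]
  apply List.map_congr_left
  intro n _
  show (List.range 8).foldl (fun c _ => stepA p c) (Int.ofNat n) = _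
  rw [foldl_const_iterate, show Int.ofNat n = (n : Int) from rfl, iterate_stepA_cast]
  rfl

lemma inner_map (i crcN : Nat) : ∀ (l : List Nat) (t : List Nat),
    l.foldl (fun tt j => tt.set (i + j) (PySem.Int.bxor ((crcN : Nat) : Int) (tt.getD j 0)))
        (t.map (fun x : Nat => (x : Int)))
      = (l.foldl (fun tt j => tt.set (i + j) (crcN ^^^ tt.getD j 0)) t).map (fun x : Nat => (x : Int)) := by
  intro l
  induction l with
  | nil => intro t; rfl
  | cons j l ih =>
    intro t
    rw [List.foldl_cons, List.foldl_cons]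
    have hstep : (t.map (fun x : Nat => (x : Int))).set (i + j)
          (PySem.Int.bxor ((crcN : Nat) : Int) ((t.map (fun x : Nat => (x : Int))).getD j 0))
        = (t.set (i + j) (crcN ^^^ t.getD j 0)).map (fun x : Nat => (x : Int)) := by
      rw [getD_map_cast, PySem.Int.bxor_natCast, List.map_set]
    rw [hstep, ih]

lemma foldB_bridge (p : Int) : ∀ (l : List Nat) (t : List Nat) (c : Nat),
    l.foldl (stepBInt p) (t.map (fun x : Nat => (x : Int)), ((c : Nat) : Int)) =
      (((l.foldl (tabStepN (lowByte p)) (t, c)).1).map (fun x : Nat => (x : Int)),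
       (((l.foldl (tabStepN (lowByte p)) (t, c)).2 : Nat) : Int)) := by
  intro l
  induction l with
  | nil => intro t c; rfl
  | cons k l ih =>
    intro t c
    rw [List.foldl_cons, List.foldl_cons]
    have hstep : stepBInt p (t.map (fun x : Nat => (x : Int)), ((c : Nat) : Int)) k =
        ((tabStepN (lowByte p) (t, c) k).1.map (fun x : Nat => (x : Int)),
         (((tabStepN (lowByte p) (t, c) k).2 : Nat) : Int)) := by
      show ((List.range (1 <<< k)).foldl
          (fun tt j => tt.set ((1 <<< k) + j) (PySem.Int.bxor (stepA p ((c : Nat) : Int)) (tt.getD j 0)))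
          (t.map (fun x : Nat => (x : Int))), stepA p ((c : Nat) : Int)) = _
      rw [stepA_cast, inner_map (1 <<< k) (natStep (lowByte p) c) (List.range (1 <<< k)) t]
      rfl
    rw [hstep, ih]

set_option maxRecDepth 8000 in
set_option maxHeartbeats 1000000 in
lemma portB_eq (p : Int) :
    gen_crc8_table_py_alt p = (tableB (lowByte p)).map (fun x : Nat => (x : Int)) := by
  have h1 : ((List.replicate 256 (0:Int)), (128:Int)) =
      ((List.replicate 256 (0:Nat)).map (fun x : Nat => (x : Int)), (((128:Nat) : Nat) : Int)) := by
    rw [List.map_replicate]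
    norm_num
  rw [show gen_crc8_table_py_alt p =
      ((List.range 8).foldl (stepBInt p) (List.replicate 256 0, 128)).1 from rfl, h1,
    foldB_bridge]
  have ht : tableB (lowByte p) =
      ((List.range 8).foldl (tabStepN (lowByte p)) (List.replicate 256 0, 128)).1 := rfl
  rw [ht]

-- ===== VERDICT (by name: the statement is the Claim_ definition above) =====
theorem gen_crc8_table_py_spec : Claim_equal_gen_crc8_table_py := by
  intro poly _
  unfold Spec_gen_crc8_table_py
  rw [portA_eq, portB_eq, tableB_eq, List.map_map]
  rfl
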